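-- pv_equiv track=rewrite | github.com/mvrogozov/algorithms | contest/practicum/Algorithms/hash_C_prefix_hash.py | get_hash_table
-- ===== SOURCE A (Python) =====
-- def get_poli_hash(alpha, modul, string):
--     result = ord(string[0])
--     for value in string[1:]:
--         result = (result * alpha + ord(value)) % modul
--     return result % modul
--
-- def get_hash_table(alpha, modul, text):
--     table = {}
--     length = len(text)
--     for index in range(length):
--         for index_in in range(index, len(text)):
--             table[(index + 1, index_in + 1)] = get_poli_hash(
--                 alpha, modul, text[index:index_in + 1]
--             )
--     return table
-- ===== SOURCE B (Python) =====
-- def get_hash_table(alpha, modul, text):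
--     # O(n^2): prefix polynomial hashes + alpha powers; each substring hash in O(1)
--     pw = [1]
--     h = [0]
--     p = 1
--     acc = 0
--     for ch in text:
--         p = p * alpha % modul
--         acc = (acc * alpha + ord(ch)) % modul
--         pw.append(p)
--         h.append(acc)
--     n = len(text)
--     return {(i + 1, j): (h[j] - h[i] * pw[j - i]) % modul
--             for i in range(n) for j in range(i + 1, n + 1)}
-- ===== Notes on version B (the rewrite author's own statement) =====
-- stated objective: faster
-- what changed: A rehashes every substring from scratch (nested loops calling an O(length) Horner hash, O(n^3)); B precomputes prefix polynomial hashes and alpha powers in one pass and emits each substring hash in O(1), O(n^2) total.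
import Mathlib
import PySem

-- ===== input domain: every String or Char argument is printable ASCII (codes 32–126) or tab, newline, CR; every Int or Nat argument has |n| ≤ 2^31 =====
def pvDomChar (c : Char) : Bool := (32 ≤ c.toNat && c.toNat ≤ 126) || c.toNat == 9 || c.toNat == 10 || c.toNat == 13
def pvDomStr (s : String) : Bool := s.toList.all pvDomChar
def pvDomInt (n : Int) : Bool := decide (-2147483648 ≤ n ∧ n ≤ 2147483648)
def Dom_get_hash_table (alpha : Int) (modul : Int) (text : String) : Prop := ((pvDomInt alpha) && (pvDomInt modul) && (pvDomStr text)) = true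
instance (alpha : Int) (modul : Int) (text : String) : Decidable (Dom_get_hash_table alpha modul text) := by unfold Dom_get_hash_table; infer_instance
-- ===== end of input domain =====

-- B replaces A's per-substring rehash (O(n^3)) by prefix polynomial hashes and alpha
-- powers, giving each substring hash in O(1) (O(n^2) total); same table, same order.

-- ===== PORT A =====
-- get_poli_hash; A only ever calls it on a nonempty slice, so the [] branch
-- (where Python would raise IndexError on string[0]) is unreachable from get_hash_table.
def pvPoliHash (alpha modul : Int) (s : List Char) : Int :=
  match s with
  | [] => 0
  | c :: rest =>
    PySem.Int.mod
      (rest.foldl (fun r v => PySem.Int.mod (r * alpha + (v.toNat : Int)) modul)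
        ((c.toNat : Int))) modul

def get_hash_table (alpha : Int) (modul : Int) (text : String) : List (List Int × Int) :=
  let cs := text.toList
  let length : Int := cs.length
  ((PySem.List.pyRange 0 length 1).foldl
      (fun (table : PySem.Dict (List Int) Int) index =>
        (PySem.List.pyRange index length 1).foldl
          (fun table index_in =>
            table.insert [index + 1, index_in + 1]
              (pvPoliHash alpha modul
                (PySem.List.slice cs (some index) (some (index_in + 1))))) table)
      PySem.Dict.empty).items

-- ===== PORT B =====
def get_hash_table_alt (alpha : Int) (modul : Int) (text : String) : List (List Int × Int) :=
  let st := text.toList.foldl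
    (fun (st : List Int × List Int × Int × Int) ch =>
      let p := PySem.Int.mod (st.2.2.1 * alpha) modul
      let acc := PySem.Int.mod (st.2.2.2 * alpha + (ch.toNat : Int)) modul
      (st.1 ++ [p], st.2.1 ++ [acc], p, acc))
    ([1], [0], 1, 0)
  let pw := st.1
  let h := st.2.1
  let n : Int := text.toList.length
  (PySem.List.pyRange 0 n 1).flatMap (fun i =>
    (PySem.List.pyRange (i + 1) (n + 1) 1).map (fun j =>
      ([i + 1, j],
        PySem.Int.mod
          (PySem.List.pyGetD h j 0 -
            PySem.List.pyGetD h i 0 * PySem.List.pyGetD pw (j - i) 0) modul)))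

-- ===== PRECONDITION & SPEC =====
-- Pre_ excludes only inputs where Python A raises ZeroDivisionError: modul = 0 with nonempty text.
def Pre_get_hash_table (alpha : Int) (modul : Int) (text : String) : Prop :=
  modul ≠ 0 ∨ text = ""
instance (alpha : Int) (modul : Int) (text : String) : Decidable (Pre_get_hash_table alpha modul text) := by unfold Pre_get_hash_table; infer_instance
def pvWitness_get_hash_table : Int × Int × String := (3, 7, "ab")

def Spec_get_hash_table (alpha : Int) (modul : Int) (text : String) (out : List (List Int × Int)) : Prop := out = get_hash_table_alt alpha modul text
instance (alpha : Int) (modul : Int) (text : String) (out : List (List Int × Int)) : Decidable (Spec_get_hash_table alpha modul text out) := by unfold Spec_get_hash_table; infer_instance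

-- ===== CLAIM (what is proved, stated in full; the proofs are below) =====
def Claim_equal_get_hash_table : Prop := ∀ (alpha : Int) (modul : Int) (text : String), Dom_get_hash_table alpha modul text → Pre_get_hash_table alpha modul text → Spec_get_hash_table alpha modul text (get_hash_table alpha modul text)

-- ===== LEMMAS AND PROOFS =====

-- pure (un-modded) polynomial value of a char list, Horner style
def pvV (a x : Int) (l : List Char) : Int :=
  l.foldl (fun r c => r * a + (c.toNat : Int)) x

-- modded Horner fold (the value A's / B's running accumulators hold)
def pvHm (a m x : Int) (l : List Char) : Int :=
  l.foldl (fun r c => PySem.Int.mod (r * a + (c.toNat : Int)) m) x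

-- the list of h-values B appends, and the list of pw-values
def pvHs (a m x : Int) : List Char → List Int
  | [] => []
  | c :: t => PySem.Int.mod (x * a + (c.toNat : Int)) m ::
      pvHs a m (PySem.Int.mod (x * a + (c.toNat : Int)) m) t

def pvPows (a m p : Int) : Nat → List Int
  | 0 => []
  | k + 1 => PySem.Int.mod (p * a) m :: pvPows a m (PySem.Int.mod (p * a) m) k

def pvPowLast (a m p : Int) : Nat → Int
  | 0 => p
  | k + 1 => pvPowLast a m (PySem.Int.mod (p * a) m) k

lemma pymod_dvd (x m : Int) : m ∣ x - PySem.Int.mod x m := by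
  have h := Int.mul_fdiv_add_fmod x m
  exact ⟨x.fdiv m, by simp [PySem.Int.mod]; omega⟩

lemma pymod_congr {x y m : Int} (h : m ∣ x - y) : PySem.Int.mod x m = PySem.Int.mod y m := by
  rcases eq_or_ne m 0 with rfl | hm
  · obtain ⟨k, hk⟩ := h
    simp at hk
    have : x = y := by omega
    rw [this]
  · have hx := pymod_dvd x m
    have hy := pymod_dvd y m
    have hd : m ∣ PySem.Int.mod x m - PySem.Int.mod y m := by
      have : PySem.Int.mod x m - PySem.Int.mod y m
          = (x - y) - (x - PySem.Int.mod x m) + (y - PySem.Int.mod y m) := by ring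
      rw [this]
      exact dvd_add (dvd_sub h hx) hy
    rcases lt_or_gt_of_ne hm with hneg | hpos
    · have b1 := PySem.Int.mod_neg_bounds x hneg
      have b2 := PySem.Int.mod_neg_bounds y hneg
      have hd' : (-m) ∣ PySem.Int.mod x m - PySem.Int.mod y m := (neg_dvd).mpr hd
      have := Int.eq_zero_of_abs_lt_dvd hd'
        (by rw [abs_lt]; constructor <;> omega)
      omega
    · have b1l := PySem.Int.mod_nonneg x hpos
      have b1r := PySem.Int.mod_lt x hpos
      have b2l := PySem.Int.mod_nonneg y hpos
      have b2r := PySem.Int.mod_lt y hpos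
      have := Int.eq_zero_of_abs_lt_dvd hd (by rw [abs_lt]; constructor <;> omega)
      omega

lemma hm_congr (a m : Int) : ∀ (l : List Char) (x y : Int), m ∣ x - y →
    m ∣ pvV a x l - pvHm a m y l := by
  intro l
  induction l with
  | nil => intro x y h; simpa [pvV, pvHm] using h
  | cons c t ih =>
    intro x y h
    have step : m ∣ (x * a + (c.toNat : Int)) -
        PySem.Int.mod (y * a + (c.toNat : Int)) m := by
      have h1 : m ∣ (x * a + (c.toNat : Int)) - (y * a + (c.toNat : Int)) := by
        have : (x * a + (c.toNat : Int)) - (y * a + (c.toNat : Int)) = (x - y) * a := by ring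
        rw [this]; exact Dvd.dvd.mul_right h a
      have h2 := pymod_dvd (y * a + (c.toNat : Int)) m
      have : (x * a + (c.toNat : Int)) - PySem.Int.mod (y * a + (c.toNat : Int)) m
          = ((x * a + (c.toNat : Int)) - (y * a + (c.toNat : Int)))
            + ((y * a + (c.toNat : Int)) - PySem.Int.mod (y * a + (c.toNat : Int)) m) := by ring
      rw [this]; exact dvd_add h1 h2
    simpa [pvV, pvHm] using ih _ _ step

lemma pow_congr (a m : Int) : ∀ (k : Nat) (p q : Int), m ∣ p - q →
    m ∣ p * a ^ k - pvPowLast a m q k := by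
  intro k
  induction k with
  | zero => intro p q h; simpa [pvPowLast] using h
  | succ k ih =>
    intro p q h
    have step : m ∣ (p * a) - PySem.Int.mod (q * a) m := by
      have h1 : m ∣ p * a - q * a := by
        have : p * a - q * a = (p - q) * a := by ring
        rw [this]; exact Dvd.dvd.mul_right h a
      have h2 := pymod_dvd (q * a) m
      have : p * a - PySem.Int.mod (q * a) m
          = (p * a - q * a) + (q * a - PySem.Int.mod (q * a) m) := by ring
      rw [this]; exact dvd_add h1 h2
    have := ih (p * a) (PySem.Int.mod (q * a) m) step
    have hpow : p * a ^ (k + 1) = (p * a) * a ^ k := by ring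
    simpa [pvPowLast, hpow] using this

lemma pvV_split (a : Int) : ∀ (l : List Char) (x : Int),
    pvV a x l = x * a ^ l.length + pvV a 0 l := by
  intro l
  induction l with
  | nil => intro x; simp [pvV]
  | cons c t ih =>
    intro x
    have h1 : pvV a x (c :: t) = pvV a (x * a + (c.toNat : Int)) t := rfl
    have h2 : pvV a 0 (c :: t) = pvV a ((c.toNat : Int)) t := by
      simp [pvV]
    rw [h1, h2, ih (x * a + (c.toNat : Int)), ih ((c.toNat : Int))]
    simp [List.length_cons]
    ring

-- B's building fold, characterised
lemma build_eq (a m : Int) : ∀ (l : List Char) (pw h : List Int) (p x : Int),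
    l.foldl (fun (st : List Int × List Int × Int × Int) ch =>
        (st.1 ++ [PySem.Int.mod (st.2.2.1 * a) m],
         st.2.1 ++ [PySem.Int.mod (st.2.2.2 * a + (ch.toNat : Int)) m],
         PySem.Int.mod (st.2.2.1 * a) m,
         PySem.Int.mod (st.2.2.2 * a + (ch.toNat : Int)) m)) (pw, h, p, x)
      = (pw ++ pvPows a m p l.length, h ++ pvHs a m x l,
         pvPowLast a m p l.length, pvHm a m x l) := by
  intro l
  induction l with
  | nil => intro pw h p x; simp [pvPows, pvHs, pvPowLast, pvHm]
  | cons c t ih =>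
    intro pw h p x
    simp only [List.foldl_cons]
    rw [ih]
    simp [pvPows, pvHs, pvPowLast, pvHm, List.append_assoc]

lemma hs_get (a m : Int) : ∀ (l : List Char) (x : Int) (k : Nat), k ≤ l.length →
    (x :: pvHs a m x l).getD k 0 = pvHm a m x (l.take k) := by
  intro l
  induction l with
  | nil =>
    intro x k hk
    have hk0 : k = 0 := by simpa using hk
    subst hk0
    simp [pvHs, pvHm]
  | cons c t ih =>
    intro x k hk
    cases k with
    | zero => simp [pvHm]
    | succ k =>
      have := ih (PySem.Int.mod (x * a + (c.toNat : Int)) m) k (by simpa using hk)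
      simpa [pvHs, pvHm] using this

lemma pow_get (a m : Int) : ∀ (kmax : Nat) (p : Int) (k : Nat), k ≤ kmax →
    (p :: pvPows a m p kmax).getD k 0 = pvPowLast a m p k := by
  intro kmax
  induction kmax with
  | zero =>
    intro p k hk
    have hk0 : k = 0 := by omega
    subst hk0
    simp [pvPows, pvPowLast]
  | succ kmax ih =>
    intro p k hk
    cases k with
    | zero => simp [pvPowLast]
    | succ k =>
      have := ih (PySem.Int.mod (p * a) m) k (by omega)
      simpa [pvPows, pvPowLast] using this

-- A's get_poli_hash equals the canonical residue of the pure polynomial value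
lemma poliHash_eq (a m : Int) (c : Char) (rest : List Char) :
    pvPoliHash a m (c :: rest) = PySem.Int.mod (pvV a 0 (c :: rest)) m := by
  have h1 : pvPoliHash a m (c :: rest) = PySem.Int.mod (pvHm a m ((c.toNat : Int)) rest) m := rfl
  have h2 : pvV a 0 (c :: rest) = pvV a ((c.toNat : Int)) rest := by simp [pvV]
  rw [h1, h2]
  exact (pymod_congr (by simpa using (hm_congr a m rest ((c.toNat : Int)) ((c.toNat : Int)) (by simp)))).symm

-- the A-side row for outer index i
def pvRowA (a m : Int) (cs : List Char) (i : Int) : List (List Int × Int) :=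
  (PySem.List.pyRange i (cs.length : Int) 1).map (fun j =>
    ([i + 1, j + 1], pvPoliHash a m (PySem.List.slice cs (some i) (some (j + 1)))))

-- the outer loop, dict items characterised
lemma outer_items (a m : Int) (cs : List Char) :
    ∀ (cnt : Nat) (i : Int) (d : PySem.Dict (List Int) Int),
    (∀ p q : Int, [p, q] ∈ d.keys → p ≤ i) → i + cnt = (cs.length : Int) →
    ((PySem.List.pyRange i (cs.length : Int) 1).foldl
        (fun table index =>
          (PySem.List.pyRange index (cs.length : Int) 1).foldl
            (fun table index_in =>
              table.insert [index + 1, index_in + 1]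
                (pvPoliHash a m
                  (PySem.List.slice cs (some index) (some (index_in + 1))))) table)
        d).items
      = d.items ++ (PySem.List.pyRange i (cs.length : Int) 1).flatMap (pvRowA a m cs) := by
  intro cnt
  induction cnt with
  | zero =>
    intro i d hinv hn
    rw [PySem.List.pyRange_one_eq_nil (by omega)]
    simp
  | succ cnt ih =>
    intro i d hinv hn
    rw [PySem.List.pyRange_one_cons (by omega)]
    simp only [List.foldl_cons, List.flatMap_cons]
    have hfresh : ∀ j ∈ PySem.List.pyRange i (cs.length : Int) 1,
        d.contains [i + 1, j + 1] = false := by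
      intro j hj
      rw [PySem.Dict.contains_eq_decide_mem_keys]
      simp only [decide_eq_false_iff_not]
      intro hmem
      have := hinv (i + 1) (j + 1) hmem
      omega
    have hnodup : ((PySem.List.pyRange i (cs.length : Int) 1).map
        (fun j => ([i + 1, j + 1] : List Int))).Nodup := by
      refine (PySem.List.nodup_pyRange_one i (cs.length : Int)).map ?_
      intro x y hxy
      simp at hxy
      omega
    have hinner := PySem.Dict.items_foldl_insert_fresh
      (PySem.List.pyRange i (cs.length : Int) 1)
      (fun j => ([i + 1, j + 1] : List Int))
      (fun j => pvPoliHash a m (PySem.List.slice cs (some i) (some (j + 1))))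
      d hfresh hnodup
    have hkeys : (((PySem.List.pyRange i (cs.length : Int) 1).foldl
        (fun table index_in =>
          table.insert [i + 1, index_in + 1]
            (pvPoliHash a m (PySem.List.slice cs (some i) (some (index_in + 1))))) d)).keys
        = PySem.Set.update d.keys
          ((PySem.List.pyRange i (cs.length : Int) 1).map (fun j => ([i + 1, j + 1] : List Int))) :=
      PySem.Dict.keys_foldl_insert_key _ _ _ d
    rw [ih (i + 1) _ ?_ (by omega)]
    · rw [hinner]
      simp [pvRowA, List.append_assoc]
    · intro p q hmem
      rw [hkeys] at hmem
      rcases (PySem.Set.mem_union _ _ _).mp hmem with h1 | h2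
      · have := hinv p q h1; omega
      · simp only [List.mem_map] at h2
        obtain ⟨j, _, hj⟩ := h2
        simp at hj
        omega

-- pure value of a prefix split: the exact identity behind the O(1) substring hash
lemma pvV_take_split (a : Int) (cs : List Char) (it d : Nat) (hle : it + d ≤ cs.length) :
    pvV a 0 (cs.take (it + d)) =
      pvV a 0 (cs.take it) * a ^ d + pvV a 0 ((cs.drop it).take d) := by
  have hsplit : cs.take (it + d) = cs.take it ++ (cs.drop it).take d := by
    rw [List.take_add]
  have hlen : ((cs.drop it).take d).length = d := by
    rw [List.length_take, List.length_drop]; omega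
  rw [hsplit, pvV, List.foldl_append, ← pvV, ← pvV, pvV_split a _ (pvV a 0 (cs.take it)), hlen]

-- one table entry: A's rehash of the slice equals B's prefix-hash combination
lemma entry_eq (a m : Int) (cs : List Char) (it k : Nat) (hlt : it + k < cs.length) :
    pvPoliHash a m (PySem.List.slice cs (some ((it : Nat) : Int)) (some (((it : Nat) : Int) + ((k + 1 : Nat) : Int))))
      = PySem.Int.mod ((0 :: pvHs a m 0 cs).getD (it + 1 + k) 0
          - (0 :: pvHs a m 0 cs).getD it 0 * (1 :: pvPows a m 1 cs.length).getD (k + 1) 0) m := by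
  rw [PySem.List.slice_natCast_add]
  rw [hs_get a m cs 0 (it + 1 + k) (by omega), hs_get a m cs 0 it (by omega),
      pow_get a m cs.length 1 (k + 1) (by omega)]
  have hseg : ((cs.drop it).take (k + 1)) ≠ [] := by
    intro h
    have := congrArg List.length h
    rw [List.length_take, List.length_drop] at this
    simp at this
    omega
  obtain ⟨c, rest, hcr⟩ := List.exists_cons_of_ne_nil hseg
  rw [hcr, poliHash_eq, ← hcr]
  have h1 : m ∣ pvV a 0 (cs.take (it + 1 + k)) - pvHm a m 0 ((cs.take (it + 1 + k))) :=
    hm_congr a m _ 0 0 (by simp)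
  have h2 : m ∣ pvV a 0 (cs.take it) - pvHm a m 0 (cs.take it) :=
    hm_congr a m _ 0 0 (by simp)
  have h3 : m ∣ 1 * a ^ (k + 1) - pvPowLast a m 1 (k + 1) :=
    pow_congr a m (k + 1) 1 1 (by simp)
  have hsp := pvV_take_split a cs it (k + 1) (by omega)
  have hidx : it + (k + 1) = it + 1 + k := by omega
  rw [hidx] at hsp
  apply pymod_congr
  have hseg2 : pvV a 0 ((cs.drop it).take (k + 1)) =
      pvV a 0 (cs.take (it + 1 + k)) - pvV a 0 (cs.take it) * a ^ (k + 1) := by linarith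
  rw [hseg2]
  have hexp : pvV a 0 (cs.take (it + 1 + k)) - pvV a 0 (cs.take it) * a ^ (k + 1) -
      (pvHm a m 0 (cs.take (it + 1 + k)) -
        pvHm a m 0 (cs.take it) * pvPowLast a m 1 (k + 1))
      = (pvV a 0 (cs.take (it + 1 + k)) - pvHm a m 0 (cs.take (it + 1 + k)))
        - (pvV a 0 (cs.take it) - pvHm a m 0 (cs.take it)) * pvPowLast a m 1 (k + 1)
        - pvV a 0 (cs.take it) * (1 * a ^ (k + 1) - pvPowLast a m 1 (k + 1)) := by
    ring
  rw [hexp]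
  exact dvd_sub (dvd_sub h1 (Dvd.dvd.mul_right h2 _)) (Dvd.dvd.mul_left h3 _)

-- one row: A's row for outer index i equals B's row
lemma row_eq (a m : Int) (cs : List Char) (i : Int) (h0 : 0 ≤ i) (hi : i < (cs.length : Int)) :
    pvRowA a m cs i
      = (PySem.List.pyRange (i + 1) ((cs.length : Int) + 1) 1).map (fun j =>
          (([i + 1, j] : List Int),
            PySem.Int.mod
              (PySem.List.pyGetD (0 :: pvHs a m 0 cs) j 0 -
                PySem.List.pyGetD (0 :: pvHs a m 0 cs) i 0 *
                  PySem.List.pyGetD (1 :: pvPows a m 1 cs.length) (j - i) 0) m)) := by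
  obtain ⟨it, rfl⟩ : ∃ it : Nat, i = (it : Int) := ⟨i.toNat, (Int.toNat_of_nonneg h0).symm⟩
  rw [pvRowA, PySem.List.pyRange_one ((it : Int)) ((cs.length : Int)),
      PySem.List.pyRange_one ((it : Int) + 1) ((cs.length : Int) + 1)]
  have hdiff : ((cs.length : Int) + 1 - ((it : Int) + 1)).toNat = ((cs.length : Int) - (it : Int)).toNat := by
    omega
  rw [hdiff, List.map_map, List.map_map]
  apply List.map_congr_left
  intro k hk
  rw [List.mem_range] at hk
  have hlt : it + k < cs.length := by omega
  simp only [Function.comp_apply]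
  have hkey : ((it : Int) + (k : Int)) + 1 = ((it : Int) + 1) + (k : Int) := by ring
  have hargA : ((it : Int) + (k : Int)) + 1 = (it : Int) + ((k + 1 : Nat) : Int) := by push_cast; ring
  have hidxj : (it : Int) + 1 + (k : Int) = ((it + 1 + k : Nat) : Int) := by push_cast; ring
  have hidxd : ((it : Int) + 1 + (k : Int)) - (it : Int) = ((k + 1 : Nat) : Int) := by push_cast; ring
  rw [hargA, entry_eq a m cs it k hlt, hidxd, hidxj]
  simp only [PySem.List.pyGetD_natCast, Prod.mk.injEq, List.cons.injEq, and_true, true_and]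
  push_cast
  omega

-- ===== VERDICT (by name: the statement is the Claim_ definition above) =====
theorem get_hash_table_spec : Claim_equal_get_hash_table := by
  intro alpha modul text _ _
  unfold Spec_get_hash_table
  simp only [get_hash_table, get_hash_table_alt]
  rw [build_eq]
  have hA := outer_items alpha modul text.toList text.toList.length 0 PySem.Dict.empty
    (by intro p q h; simp [PySem.Dict.keys_empty] at h) (by omega)
  rw [hA]
  have hempty : (PySem.Dict.empty : PySem.Dict (List Int) Int).items = [] := rfl
  rw [hempty, List.nil_append]
  apply List.flatMap_congr
  intro i hi
  rw [PySem.List.mem_pyRange_one] at hi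
  simpa using row_eq alpha modul text.toList i hi.1 hi.2
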